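-- pv_equiv track=rewrite | github.com/REllwood/cloud-run-hackathon-python | main.py | solve
-- ===== SOURCE A (Python) =====
-- def solve(pts, pt):
--     x, y = pt
--     idx = -1
--     smallest = float("inf")
--     for p in pts:
--         if p[0] <= x or p[1] <= y:
--             dist = abs(x - p[0]) + abs(y - p[1])
--             if dist < smallest:
--                 idx = pts.index(p)
--                 smallest = dist
--             elif dist == smallest:
--                 if pts.index(p) < idx:
--                     idx = pts.index(p)
--                     smallest = dist
--     return idx
-- ===== SOURCE B (Python) =====
-- def solve(pts, pt):
--     x, y = pt
--     best = None
--     for p in pts: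
--         if p[0] <= x or p[1] <= y:
--             d = abs(x - p[0]) + abs(y - p[1])
--             if best is None or d < best:
--                 best = d
--     if best is None:
--         return -1
--     for i, p in enumerate(pts):
--         if (p[0] <= x or p[1] <= y) and abs(x - p[0]) + abs(y - p[1]) == best:
--             return i
--     return -1
-- ===== Notes on version B (the rewrite author's own statement) =====
-- stated objective: alternative
-- what changed: A's single interleaved scan that maintains an argmin index with explicit tie-breaking via repeated pts.index calls is replaced by a bound-then-locate decomposition: a first pass computes only the minimum Manhattan distance over qualifying points (no index tracking at all), and a second pass returns the first enumerate index whose point qualifies and attains that bound, so the tie-break logic disappears.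
import Mathlib
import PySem

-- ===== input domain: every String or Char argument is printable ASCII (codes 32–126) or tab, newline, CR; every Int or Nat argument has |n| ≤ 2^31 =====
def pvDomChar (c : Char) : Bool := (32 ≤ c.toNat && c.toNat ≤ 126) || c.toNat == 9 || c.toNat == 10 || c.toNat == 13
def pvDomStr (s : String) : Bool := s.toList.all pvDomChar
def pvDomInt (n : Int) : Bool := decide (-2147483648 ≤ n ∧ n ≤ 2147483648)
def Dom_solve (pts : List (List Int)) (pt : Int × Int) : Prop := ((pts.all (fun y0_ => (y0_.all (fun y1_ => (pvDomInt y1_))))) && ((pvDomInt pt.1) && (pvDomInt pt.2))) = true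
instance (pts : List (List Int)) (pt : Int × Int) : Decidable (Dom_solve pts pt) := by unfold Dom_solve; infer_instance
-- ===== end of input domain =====

-- B replaces A's interleaved argmin scan (running best + pts.index tie-breaking) by a
-- bound-then-locate decomposition: pass 1 computes only the minimal distance, pass 2
-- returns the first qualifying index attaining it; objective: alternative.

-- ===== PORT A =====
-- One loop iteration of A; pyGetD is exact here because Pre_solve guarantees every point has
-- length ≥ 2 (outside Pre_solve the Python raises IndexError and nothing is claimed).
def solveStep (pts : List (List Int)) (x y : Int) (st : Int × Option Int) (p : List Int) :
    Int × Option Int :=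
  let p0 := PySem.List.pyGetD p 0 0
  let p1 := PySem.List.pyGetD p 1 0
  if p0 ≤ x ∨ p1 ≤ y then
    let dist := |x - p0| + |y - p1|
    match st.2 with
    | none => ((((PySem.List.index? pts p).getD 0 : Nat) : Int), some dist)
    | some s =>
      if dist < s then ((((PySem.List.index? pts p).getD 0 : Nat) : Int), some dist)
      else if dist = s then
        if (((PySem.List.index? pts p).getD 0 : Nat) : Int) < st.1 then
          ((((PySem.List.index? pts p).getD 0 : Nat) : Int), some dist)
        else st
      else st
  else st

-- idx = -1, smallest = float("inf") (None = inf); returns idx.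
def solve (pts : List (List Int)) (pt : Int × Int) : Int :=
  (pts.foldl (solveStep pts pt.1 pt.2) ((-1 : Int), (none : Option Int))).1

-- ===== PORT B =====
-- Pass 1 loop body: if qualifying, best = d when best is None or d < best.
def altStep (x y : Int) (best : Option Int) (p : List Int) : Option Int :=
  if PySem.List.pyGetD p 0 0 ≤ x ∨ PySem.List.pyGetD p 1 0 ≤ y then
    let d := |x - PySem.List.pyGetD p 0 0| + |y - PySem.List.pyGetD p 1 0|
    match best with
    | none => some d
    | some s => if d < s then some d else some s
  else best

-- Pass 2: 'for i, p in enumerate(pts): if (…) and dist == best: return i'; the trailing -1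
-- is Source B's final 'return -1'.
def altFind (x y bv : Int) : List (Int × List Int) → Int
  | [] => -1
  | (i, p) :: t =>
    if (PySem.List.pyGetD p 0 0 ≤ x ∨ PySem.List.pyGetD p 1 0 ≤ y) ∧
        |x - PySem.List.pyGetD p 0 0| + |y - PySem.List.pyGetD p 1 0| = bv then i
    else altFind x y bv t

def solve_alt (pts : List (List Int)) (pt : Int × Int) : Int :=
  let x := pt.1
  let y := pt.2
  match pts.foldl (altStep x y) none with
  | none => -1
  | some bv => altFind x y bv (PySem.List.enumerate pts 0)

-- ===== PRECONDITION & SPEC =====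
-- Pre_solve: exactly the inputs where Python A returns normally; on a point with fewer than two
-- coordinates A raises IndexError (p[0] or p[1]).
def Pre_solve (pts : List (List Int)) (pt : Int × Int) : Prop := ∀ p ∈ pts, 2 ≤ p.length
instance (pts : List (List Int)) (pt : Int × Int) : Decidable (Pre_solve pts pt) := by
  unfold Pre_solve; infer_instance

def pvWitness_solve : List (List Int) × (Int × Int) := ([[0, 0], [2, 3]], (1, 1))

def Spec_solve (pts : List (List Int)) (pt : Int × Int) (out : Int) : Prop := out = solve_alt pts pt
instance (pts : List (List Int)) (pt : Int × Int) (out : Int) : Decidable (Spec_solve pts pt out) := by unfold Spec_solve; infer_instance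

-- ===== CLAIM (what is proved, stated in full; the proofs are below) =====
def Claim_equal_solve : Prop := ∀ (pts : List (List Int)) (pt : Int × Int), Dom_solve pts pt → Pre_solve pts pt → Spec_solve pts pt (solve pts pt)

-- ===== LEMMAS AND PROOFS =====

-- The filter/distance of both programs, as proof-side abbreviations.
def pvQual (x y : Int) (p : List Int) : Bool :=
  decide (PySem.List.pyGetD p 0 0 ≤ x ∨ PySem.List.pyGetD p 1 0 ≤ y)

def pvD (x y : Int) (p : List Int) : Int :=
  |x - PySem.List.pyGetD p 0 0| + |y - PySem.List.pyGetD p 1 0|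

def pvIdx (pts : List (List Int)) (p : List Int) : Int :=
  (((PySem.List.index? pts p).getD 0 : Nat) : Int)

-- An abstract lexicographic-min fold step over (dist, index) pairs.
def pvLStep (acc : Option (Int × Int)) (c : Int × Int) : Option (Int × Int) :=
  match acc with
  | none => some c
  | some m => if c.1 < m.1 ∨ (c.1 = m.1 ∧ c.2 < m.2) then some c else some m

def pvStOf : Option (Int × Int) → Int × Option Int
  | none => (-1, none)
  | some m => (m.2, some m.1)

def pvLe (a b : Int × Int) : Prop := a.1 < b.1 ∨ (a.1 = b.1 ∧ a.2 ≤ b.2)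

def pvLA (pts : List (List Int)) (x y : Int) : List (Int × Int) :=
  (pts.filter (pvQual x y)).map (fun p => (pvD x y p, pvIdx pts p))

def pvLB (pts : List (List Int)) (x y : Int) : List (Int × Int) :=
  ((PySem.List.enumerate pts 0).filter (fun ip => pvQual x y ip.2)).map
    (fun ip => (pvD x y ip.2, ip.1))

-- The min-only fold step of B's first pass.
def pvMStep (b : Option Int) (d : Int) : Option Int :=
  match b with
  | none => some d
  | some s => if d < s then some d else some s

theorem pv_foldA (pts : List (List Int)) (x y : Int) :
    ∀ (l : List (List Int)) (o : Option (Int × Int)),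
      l.foldl (solveStep pts x y) (pvStOf o) =
        pvStOf (((l.filter (pvQual x y)).map (fun p => (pvD x y p, pvIdx pts p))).foldl pvLStep o) := by
  intro l
  induction l with
  | nil => intro o; rfl
  | cons p t ih =>
    intro o
    by_cases hq : pvQual x y p = true
    · have hstep : solveStep pts x y (pvStOf o) p = pvStOf (pvLStep o (pvD x y p, pvIdx pts p)) := by
        cases o with
        | none =>
          simp only [solveStep, pvStOf, pvLStep, pvD, pvIdx]
          rw [if_pos (by simpa [pvQual] using hq)]
        | some m =>
          simp only [solveStep, pvStOf, pvLStep, pvD, pvIdx]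
          rw [if_pos (by simpa [pvQual] using hq)]
          split_ifs <;> simp_all [pvStOf] <;> omega
      simp [List.foldl_cons, hq, hstep, ih]
    · have hstep : solveStep pts x y (pvStOf o) p = pvStOf o := by
        simp only [solveStep]
        rw [if_neg (by simpa [pvQual] using hq)]
      simp [List.foldl_cons, hq, hstep, ih]

-- B's first pass equals the min-fold over the filtered distance list.
theorem pv_foldB (x y : Int) :
    ∀ (l : List (List Int)) (o : Option Int),
      l.foldl (altStep x y) o = ((l.filter (pvQual x y)).map (pvD x y)).foldl pvMStep o := by
  intro l
  induction l with
  | nil => intro o; rfl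
  | cons p t ih =>
    intro o
    by_cases hq : pvQual x y p = true
    · have hstep : altStep x y o p = pvMStep o (pvD x y p) := by
        simp only [altStep, pvMStep, pvD]
        rw [if_pos (by simpa [pvQual] using hq)]
      simp [List.foldl_cons, hq, hstep, ih]
    · have hstep : altStep x y o p = o := by
        simp only [altStep]
        rw [if_neg (by simpa [pvQual] using hq)]
      simp [List.foldl_cons, hq, hstep, ih]

theorem pvLe_trans {a b c : Int × Int} (h1 : pvLe a b) (h2 : pvLe b c) : pvLe a c := by
  unfold pvLe at *; omega

theorem pv_fold_some :
    ∀ (L : List (Int × Int)) (m : Int × Int),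
      ∃ r, L.foldl pvLStep (some m) = some r ∧ (r = m ∨ r ∈ L) ∧ pvLe r m ∧ ∀ c ∈ L, pvLe r c := by
  intro L
  induction L with
  | nil =>
    intro m
    exact ⟨m, rfl, Or.inl rfl, Or.inr ⟨rfl, le_refl _⟩, by simp⟩
  | cons c t ih =>
    intro m
    rw [List.foldl_cons]
    have hstep : pvLStep (some m) c =
        if c.1 < m.1 ∨ (c.1 = m.1 ∧ c.2 < m.2) then some c else some m := rfl
    rw [hstep]
    by_cases h : c.1 < m.1 ∨ (c.1 = m.1 ∧ c.2 < m.2)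
    · rw [if_pos h]
      obtain ⟨r, hr, hmem, hle, hall⟩ := ih c
      refine ⟨r, hr, ?_, ?_, ?_⟩
      · rcases hmem with rfl | hm
        · exact Or.inr (List.mem_cons_self)
        · exact Or.inr (List.mem_cons_of_mem _ hm)
      · exact pvLe_trans hle (by unfold pvLe; omega)
      · intro d hd
        rcases List.mem_cons.mp hd with rfl | hd
        · exact hle
        · exact hall d hd
    · rw [if_neg h]
      obtain ⟨r, hr, hmem, hle, hall⟩ := ih m
      refine ⟨r, hr, ?_, hle, ?_⟩
      · rcases hmem with rfl | hm
        · exact Or.inl rfl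
        · exact Or.inr (List.mem_cons_of_mem _ hm)
      · intro d hd
        rcases List.mem_cons.mp hd with rfl | hd
        · exact pvLe_trans hle (by unfold pvLe; omega)
        · exact hall d hd

theorem pv_fold_none_spec (L : List (Int × Int)) (hL : L ≠ []) :
    ∃ r, L.foldl pvLStep none = some r ∧ r ∈ L ∧ ∀ c ∈ L, pvLe r c := by
  cases L with
  | nil => exact absurd rfl hL
  | cons c t =>
    rw [List.foldl_cons]
    show ∃ r, t.foldl pvLStep (some c) = some r ∧ _
    obtain ⟨r, hr, hmem, hle, hall⟩ := pv_fold_some t c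
    refine ⟨r, hr, ?_, ?_⟩
    · rcases hmem with rfl | hm
      · exact List.mem_cons_self
      · exact List.mem_cons_of_mem _ hm
    · intro d hd
      rcases List.mem_cons.mp hd with rfl | hd
      · exact hle
      · exact hall d hd

-- min-fold (pass 1) spec: over a nonempty list it returns the minimum.
theorem pv_mfold_some :
    ∀ (L : List Int) (m : Int),
      ∃ r, L.foldl pvMStep (some m) = some r ∧ (r = m ∨ r ∈ L) ∧ r ≤ m ∧ ∀ a ∈ L, r ≤ a := by
  intro L
  induction L with
  | nil => intro m; exact ⟨m, rfl, Or.inl rfl, le_refl _, by simp⟩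
  | cons a t ih =>
    intro m
    rw [List.foldl_cons]
    have hstep : pvMStep (some m) a = if a < m then some a else some m := rfl
    rw [hstep]
    by_cases h : a < m
    · rw [if_pos h]
      obtain ⟨r, hr, hmem, hle, hall⟩ := ih a
      refine ⟨r, hr, ?_, by omega, ?_⟩
      · rcases hmem with rfl | hm
        · exact Or.inr (List.mem_cons_self)
        · exact Or.inr (List.mem_cons_of_mem _ hm)
      · intro d hd
        rcases List.mem_cons.mp hd with rfl | hd
        · exact hle
        · exact hall d hd
    · rw [if_neg h]
      obtain ⟨r, hr, hmem, hle, hall⟩ := ih m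
      refine ⟨r, hr, ?_, hle, ?_⟩
      · rcases hmem with rfl | hm
        · exact Or.inl rfl
        · exact Or.inr (List.mem_cons_of_mem _ hm)
      · intro d hd
        rcases List.mem_cons.mp hd with rfl | hd
        · omega
        · exact hall d hd

theorem pv_mfold_none_spec (L : List Int) (hL : L ≠ []) :
    ∃ r, L.foldl pvMStep none = some r ∧ r ∈ L ∧ ∀ a ∈ L, r ≤ a := by
  cases L with
  | nil => exact absurd rfl hL
  | cons a t =>
    rw [List.foldl_cons]
    show ∃ r, t.foldl pvMStep (some a) = some r ∧ _
    obtain ⟨r, hr, hmem, hle, hall⟩ := pv_mfold_some t a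
    refine ⟨r, hr, ?_, ?_⟩
    · rcases hmem with rfl | hm
      · exact List.mem_cons_self
      · exact List.mem_cons_of_mem _ hm
    · intro d hd
      rcases List.mem_cons.mp hd with rfl | hd
      · exact hle
      · exact hall d hd

-- pass 2: altFind over enumerate returns s + k for the first matching position k.
theorem pv_find_first (x y bv : Int) :
    ∀ (l : List (List Int)) (s : Int) (k : Nat) (hk : k < l.length),
      (pvQual x y l[k] = true ∧ pvD x y l[k] = bv) →
      (∀ j : Nat, ∀ hj : j < k, ¬ (pvQual x y (l[j]'(by omega)) = true ∧ pvD x y (l[j]'(by omega)) = bv)) →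
      altFind x y bv (PySem.List.enumerate l s) = s + k := by
  intro l
  induction l with
  | nil => intro s k hk; simp at hk
  | cons p t ih =>
    intro s k hk hM hfirst
    rw [PySem.List.enumerate_cons]
    cases k with
    | zero =>
      simp only [List.getElem_cons_zero] at hM
      simp only [altFind]
      rw [if_pos (And.intro (by simpa [pvQual] using hM.1) (by simpa [pvD] using hM.2))]
      simp
    | succ k =>
      have hp : ¬ (pvQual x y p = true ∧ pvD x y p = bv) := by
        have := hfirst 0 (by omega)
        simpa using this
      simp only [altFind]
      rw [if_neg (by
        intro hc
        exact hp ⟨by simpa [pvQual] using hc.1, by simpa [pvD] using hc.2⟩)]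
      have := ih (s + 1) k (by simpa using hk)
        (by simpa using hM)
        (by intro j hj; have := hfirst (j + 1) (by omega); simpa using this)
      rw [this]; omega

theorem pv_mem_LA (pts : List (List Int)) (x y : Int) (e : Int × Int) :
    e ∈ pvLA pts x y ↔ ∃ p ∈ pts, pvQual x y p = true ∧ e = (pvD x y p, pvIdx pts p) := by
  unfold pvLA
  simp only [List.mem_map, List.mem_filter]
  constructor
  · rintro ⟨p, ⟨hp, hq⟩, rfl⟩; exact ⟨p, hp, hq, rfl⟩
  · rintro ⟨p, hp, hq, rfl⟩; exact ⟨p, ⟨hp, hq⟩, rfl⟩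

theorem pv_mem_LB (pts : List (List Int)) (x y : Int) (e : Int × Int) :
    e ∈ pvLB pts x y ↔
      ∃ (k : Nat) (h : k < pts.length),
        pvQual x y pts[k] = true ∧ e = (pvD x y pts[k], (k : Int)) := by
  unfold pvLB
  simp only [List.mem_map, List.mem_filter, PySem.List.mem_enumerate_iff]
  constructor
  · rintro ⟨ip, ⟨⟨k, hk, rfl⟩, hq⟩, rfl⟩
    exact ⟨k, hk, hq, by simp⟩
  · rintro ⟨k, hk, hq, rfl⟩
    exact ⟨((k : Int), pts[k]), ⟨⟨k, hk, by simp⟩, hq⟩, by simp⟩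

theorem pv_idx_spec (pts : List (List Int)) (p : List Int) (hp : p ∈ pts) :
    ∃ j : Nat, PySem.List.index? pts p = some j ∧ j < pts.length ∧ pts[j]! = p ∧
      ∀ k : Nat, ∀ hk : k < pts.length, pts[k] = p → j ≤ k := by
  obtain ⟨j, hj⟩ := Option.isSome_iff_exists.mp ((PySem.List.index?_isSome_iff pts p).mpr hp)
  obtain ⟨hjl, hje, hmin⟩ := PySem.List.getElem_of_index?_eq_some hj
  refine ⟨j, hj, hjl, by simp [hjl, hje], ?_⟩
  intro k hk hke
  by_contra hlt
  exact hmin k (by omega) hke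

theorem pvLe_antisymm {a b : Int × Int} (h1 : pvLe a b) (h2 : pvLe b a) : a = b := by
  unfold pvLe at *
  have : a.1 = b.1 ∧ a.2 = b.2 := by omega
  exact Prod.ext this.1 this.2

theorem pv_folds_eq (pts : List (List Int)) (x y : Int) :
    (pvLA pts x y).foldl pvLStep none = (pvLB pts x y).foldl pvLStep none := by
  by_cases hA : pvLA pts x y = []
  · have hB : pvLB pts x y = [] := by
      rcases List.eq_nil_or_concat (pvLB pts x y) with h | ⟨l, e, h⟩
      · exact h
      · exfalso
        have he : e ∈ pvLB pts x y := by rw [h]; simp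
        obtain ⟨k, hk, hq, rfl⟩ := (pv_mem_LB pts x y e).mp he
        have : (pvD x y pts[k], pvIdx pts pts[k]) ∈ pvLA pts x y :=
          (pv_mem_LA pts x y _).mpr ⟨pts[k], by simp, hq, rfl⟩
        rw [hA] at this; simp at this
    rw [hA, hB]
  · have hB : pvLB pts x y ≠ [] := by
      intro hB
      rcases List.eq_nil_or_concat (pvLA pts x y) with h | ⟨l, e, h⟩
      · exact hA h
      have he : e ∈ pvLA pts x y := by rw [h]; simp
      obtain ⟨p, hp, hq, rfl⟩ := (pv_mem_LA pts x y e).mp he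
      obtain ⟨j, hj, hjl, hje, _⟩ := pv_idx_spec pts p hp
      have : (pvD x y pts[j], (j : Int)) ∈ pvLB pts x y := by
        refine (pv_mem_LB pts x y _).mpr ⟨j, hjl, ?_, rfl⟩
        have : pts[j] = p := by simpa [hjl] using hje
        rw [this]; exact hq
      rw [hB] at this; simp at this
    obtain ⟨rA, hrA, hmemA, hallA⟩ := pv_fold_none_spec _ hA
    obtain ⟨rB, hrB, hmemB, hallB⟩ := pv_fold_none_spec _ hB
    rw [hrA, hrB]
    congr 1
    obtain ⟨p, hp, hq, hrAe⟩ := (pv_mem_LA pts x y rA).mp hmemA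
    obtain ⟨j, hj, hjl, hje, hjmin⟩ := pv_idx_spec pts p hp
    have hjget : pts[j] = p := by simpa [hjl] using hje
    have hrAB : rA ∈ pvLB pts x y := by
      refine (pv_mem_LB pts x y rA).mpr ⟨j, hjl, by rw [hjget]; exact hq, ?_⟩
      rw [hrAe, hjget]
      unfold pvIdx
      rw [hj]
      rfl
    have h1 : pvLe rB rA := hallB rA hrAB
    obtain ⟨k, hk, hqk, hrBe⟩ := (pv_mem_LB pts x y rB).mp hmemB
    have hpk : pts[k] ∈ pts := by simp
    obtain ⟨j', hj', hj'l, hj'e, hj'min⟩ := pv_idx_spec pts pts[k] hpk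
    have heA : (pvD x y pts[k], pvIdx pts pts[k]) ∈ pvLA pts x y :=
      (pv_mem_LA pts x y _).mpr ⟨pts[k], hpk, hqk, rfl⟩
    have h2 : pvLe rA rB := by
      refine pvLe_trans (hallA _ heA) ?_
      rw [hrBe]
      unfold pvLe pvIdx
      right
      refine ⟨rfl, ?_⟩
      rw [hj']
      have := hj'min k hk rfl
      simp; omega
    exact pvLe_antisymm h2 h1 ▸ rfl

theorem pv_mem_DL (pts : List (List Int)) (x y : Int) (a : Int) :
    a ∈ (pts.filter (pvQual x y)).map (pvD x y) ↔
      ∃ p ∈ pts, pvQual x y p = true ∧ a = pvD x y p := by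
  simp only [List.mem_map, List.mem_filter]
  constructor
  · rintro ⟨p, ⟨hp, hq⟩, rfl⟩; exact ⟨p, hp, hq, rfl⟩
  · rintro ⟨p, hp, hq, rfl⟩; exact ⟨p, ⟨hp, hq⟩, rfl⟩

-- ===== VERDICT (by name: the statement is the Claim_ definition above) =====
theorem solve_spec : Claim_equal_solve := by
  intro pts pt _ _
  unfold Spec_solve
  obtain ⟨x, y⟩ := pt
  have hA : solve pts (x, y) = (pvStOf ((pvLB pts x y).foldl pvLStep none)).1 := by
    show (pts.foldl (solveStep pts x y) (pvStOf none)).1 = _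
    rw [pv_foldA pts x y pts none]
    show (pvStOf ((pvLA pts x y).foldl pvLStep none)).1 = _
    rw [pv_folds_eq]
  have hBfold : pts.foldl (altStep x y) none =
      ((pts.filter (pvQual x y)).map (pvD x y)).foldl pvMStep none := pv_foldB x y pts none
  by_cases hF : pts.filter (pvQual x y) = []
  · -- no qualifying point: both return -1
    have hLBnil : pvLB pts x y = [] := by
      rcases List.eq_nil_or_concat (pvLB pts x y) with h | ⟨l, e, h⟩
      · exact h
      · exfalso
        have he : e ∈ pvLB pts x y := by rw [h]; simp
        obtain ⟨k, hk, hq, rfl⟩ := (pv_mem_LB pts x y e).mp he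
        have : pts[k] ∈ pts.filter (pvQual x y) := List.mem_filter.mpr ⟨by simp, hq⟩
        rw [hF] at this; simp at this
    rw [hA, hLBnil]
    show (-1 : Int) = solve_alt pts (x, y)
    show _ = (match pts.foldl (altStep x y) none with
              | none => (-1 : Int)
              | some bv => altFind x y bv (PySem.List.enumerate pts 0))
    rw [hBfold, hF]
    rfl
  · have hLBne : pvLB pts x y ≠ [] := by
      intro hB
      obtain ⟨p, hp⟩ := List.exists_mem_of_ne_nil _ hF
      obtain ⟨hpm, hq⟩ := List.mem_filter.mp hp
      obtain ⟨k, hk, hke⟩ := List.mem_iff_getElem.mp hpm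
      have : (pvD x y pts[k], (k : Int)) ∈ pvLB pts x y :=
        (pv_mem_LB pts x y _).mpr ⟨k, hk, by rw [hke]; exact hq, rfl⟩
      rw [hB] at this; simp at this
    obtain ⟨r, hr, hrmem, hrall⟩ := pv_fold_none_spec _ hLBne
    have hDLne : (pts.filter (pvQual x y)).map (pvD x y) ≠ [] := by
      simpa [List.map_eq_nil_iff] using hF
    obtain ⟨m, hm, hmmem, hmall⟩ := pv_mfold_none_spec _ hDLne
    obtain ⟨k0, hk0, hq0, hre⟩ := (pv_mem_LB pts x y r).mp hrmem
    -- m = r.1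
    have hmr : m = r.1 := by
      have h1 : r.1 ≤ m := by
        obtain ⟨p, hp, hq, rfl⟩ := (pv_mem_DL pts x y m).mp hmmem
        obtain ⟨k, hk, hke⟩ := List.mem_iff_getElem.mp hp
        have hmem : (pvD x y pts[k], (k : Int)) ∈ pvLB pts x y :=
          (pv_mem_LB pts x y _).mpr ⟨k, hk, by rw [hke]; exact hq, rfl⟩
        have := hrall _ hmem
        unfold pvLe at this
        simp only at this
        rw [hke] at this
        omega
      have h2 : m ≤ r.1 := by
        refine hmall _ ?_
        refine (pv_mem_DL pts x y r.1).mpr ⟨pts[k0], by simp, hq0, ?_⟩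
        rw [hre]
      omega
    -- the find pass returns r.2
    have hfind : altFind x y r.1 (PySem.List.enumerate pts 0) = r.2 := by
      have hM : pvQual x y pts[k0] = true ∧ pvD x y pts[k0] = r.1 := ⟨hq0, by rw [hre]⟩
      have hfirst : ∀ j : Nat, ∀ hj : j < k0,
          ¬ (pvQual x y (pts[j]'(by omega)) = true ∧ pvD x y (pts[j]'(by omega)) = r.1) := by
        intro j hj hc
        have hmem : (pvD x y (pts[j]'(by omega)), (j : Int)) ∈ pvLB pts x y :=
          (pv_mem_LB pts x y _).mpr ⟨j, by omega, hc.1, rfl⟩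
        have := hrall _ hmem
        unfold pvLe at this
        simp only at this
        rw [hc.2, hre] at this
        simp at this
        omega
      have := pv_find_first x y r.1 pts 0 k0 hk0 hM hfirst
      rw [this, hre]
      simp
    rw [hA, hr]
    show r.2 = solve_alt pts (x, y)
    show _ = (match pts.foldl (altStep x y) none with
              | none => (-1 : Int)
              | some bv => altFind x y bv (PySem.List.enumerate pts 0))
    rw [hBfold, hm, hmr]
    exact hfind.symm
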